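-- pv_equiv track=rewrite | github.com/wanglongjiang/leetcode | hard/2412-minimum-money-required-before-transactions.py | minimumMoney
-- ===== SOURCE A (Python) =====
-- from typing import List
--
-- def minimumMoney(transactions: List[List[int]]) -> int:
--     maxIncomeCost, maxCallback, sumPay = 0, 0, 0  # 3个变量分别记录盈利项目中最大的成本、亏损项目中最大的callback、合计亏损的钱数
--     for trans in transactions:
--         if trans[0] <= trans[1]:  # 正收益
--             maxIncomeCost = max(maxIncomeCost, trans[0])  # 找到正收益的交易里面成本最高的
--         else:  # 负收益
--             sumPay += trans[0] - trans[1]  # 累计亏损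
--             maxCallback = max(maxCallback, trans[1])  # 最大的遗留钱数
--     return max(maxCallback, maxIncomeCost) + sumPay
-- ===== SOURCE B (Python) =====
-- def minimumMoney(transactions):
--     # total loss incurred by losing transactions (processed first in the worst order)
--     total = 0
--     for t in transactions:
--         if t[0] > t[1]:
--             total += t[0] - t[1]
--
--     def feasible(x):
--         # capital x survives every ordering iff it covers the total loss and,
--         # for each transaction placed last, total + min(cost, cashback)
--         if x < total:
--             return False
--         for t in transactions:
--             if x < total + min(t[0], t[1]):
--                 return False
--         return True
--
--     hi = total
--     for t in transactions:
--         m = min(t[0], t[1])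
--         if m > 0:
--             hi += m
--     lo = 0
--     while lo < hi:
--         mid = (lo + hi) // 2
--         if feasible(mid):
--             hi = mid
--         else:
--             lo = mid + 1
--     return lo
-- ===== Notes on version B (the rewrite author's own statement) =====
-- stated objective: alternative
-- what changed: Replaces A's closed-form single-pass aggregation (max gain cost, max loss cashback, summed loss) by binary search on the answer: a monotone feasibility predicate checked in a linear scan, with the search range [0, total + sum of positive leftovers].
import Mathlib
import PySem

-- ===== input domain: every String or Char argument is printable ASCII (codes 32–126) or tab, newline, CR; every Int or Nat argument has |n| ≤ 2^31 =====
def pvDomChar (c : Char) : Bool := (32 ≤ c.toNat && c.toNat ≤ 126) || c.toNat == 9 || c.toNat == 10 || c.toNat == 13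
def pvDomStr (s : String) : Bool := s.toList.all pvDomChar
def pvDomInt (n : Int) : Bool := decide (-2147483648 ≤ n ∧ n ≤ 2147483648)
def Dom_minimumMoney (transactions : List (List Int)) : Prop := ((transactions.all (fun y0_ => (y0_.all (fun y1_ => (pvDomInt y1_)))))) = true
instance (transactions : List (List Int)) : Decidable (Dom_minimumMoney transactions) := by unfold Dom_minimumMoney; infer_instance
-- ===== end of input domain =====

-- B replaces A's single-pass aggregate formula by binary search on the answer with a
-- linear feasibility check: an alternative algorithm, not faster, chosen for its different structure.


-- ===== PORT A =====
-- trans[0] / trans[1] ported with pyGetD; exact under Pre_ (each row has ≥ 2 entries).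
def minimumMoney (transactions : List (List Int)) : Int :=
  let s := transactions.foldl
    (fun (st : Int × Int × Int) trans =>
      let c := PySem.List.pyGetD trans 0 0
      let b := PySem.List.pyGetD trans 1 0
      if c ≤ b then (max st.1 c, st.2.1, st.2.2)
      else (st.1, max st.2.1 b, st.2.2 + (c - b)))
    (0, 0, 0)
  max s.2.1 s.1 + s.2.2

-- ===== PORT B =====
-- B: binary search the least feasible capital; each piece ported step for step.
def pvTotalB (transactions : List (List Int)) : Int :=
  transactions.foldl
    (fun tot t =>
      if PySem.List.pyGetD t 0 0 > PySem.List.pyGetD t 1 0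
      then tot + (PySem.List.pyGetD t 0 0 - PySem.List.pyGetD t 1 0) else tot) 0

-- the early-return loop inside feasible, ported as structural recursion
def pvAllOkB (total x : Int) : List (List Int) → Bool
  | [] => true
  | t :: ts =>
      if x < total + min (PySem.List.pyGetD t 0 0) (PySem.List.pyGetD t 1 0) then false
      else pvAllOkB total x ts

def pvFeasibleB (total x : Int) (transactions : List (List Int)) : Bool :=
  if x < total then false else pvAllOkB total x transactions

def pvHiB (total : Int) (transactions : List (List Int)) : Int :=
  transactions.foldl
    (fun h t =>
      let m := min (PySem.List.pyGetD t 0 0) (PySem.List.pyGetD t 1 0)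
      if m > 0 then h + m else h) total

-- the while-loop of B
def pvBSearchB (transactions : List (List Int)) (total lo hi : Int) : Int :=
  if h : lo < hi then
    let mid := PySem.Int.floordiv (lo + hi) 2
    if pvFeasibleB total mid transactions then pvBSearchB transactions total lo mid
    else pvBSearchB transactions total (mid + 1) hi
  else lo
termination_by (hi - lo).toNat
decreasing_by
  all_goals
    have he : PySem.Int.floordiv (lo + hi) 2 = (lo + hi) / 2 :=
      PySem.Int.floordiv_eq_ediv_of_pos (by omega)
    simp only [he]
    omega

def minimumMoney_alt (transactions : List (List Int)) : Int :=
  let total := pvTotalB transactions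
  let hi := pvHiB total transactions
  pvBSearchB transactions total 0 hi

-- ===== PRECONDITION & SPEC =====
-- A indexes trans[0] and trans[1] and raises IndexError on rows shorter than 2 (B raises too).
def Pre_minimumMoney (transactions : List (List Int)) : Prop :=
  ∀ t ∈ transactions, 2 ≤ t.length
instance (transactions : List (List Int)) : Decidable (Pre_minimumMoney transactions) := by
  unfold Pre_minimumMoney; infer_instance
def pvWitness_minimumMoney : List (List Int) := [[3, 1], [2, 5], [7, 0]]

def Spec_minimumMoney (transactions : List (List Int)) (out : Int) : Prop := out = minimumMoney_alt transactions
instance (transactions : List (List Int)) (out : Int) : Decidable (Spec_minimumMoney transactions out) := by unfold Spec_minimumMoney; infer_instance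

-- ===== CLAIM (what is proved, stated in full; the proofs are below) =====
def Claim_equal_minimumMoney : Prop := ∀ (transactions : List (List Int)), Dom_minimumMoney transactions → Pre_minimumMoney transactions → Spec_minimumMoney transactions (minimumMoney transactions)

-- ===== LEMMAS AND PROOFS =====

-- leftover of a transaction if it runs last = min(cost, cashback)
def pvMin (t : List Int) : Int := min (PySem.List.pyGetD t 0 0) (PySem.List.pyGetD t 1 0)

-- the optimum: total loss plus the largest leftover (floored at 0)
def pvM (ts : List (List Int)) : Int := ts.foldl (fun m t => max m (pvMin t)) 0

-- seed shift for B's total-loss fold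
theorem pvTotalB_seed (ts : List (List Int)) : ∀ (s : Int),
    ts.foldl
      (fun tot t =>
        if PySem.List.pyGetD t 0 0 > PySem.List.pyGetD t 1 0
        then tot + (PySem.List.pyGetD t 0 0 - PySem.List.pyGetD t 1 0) else tot) s
    = s + pvTotalB ts := by
  induction ts with
  | nil => intro s; simp [pvTotalB]
  | cons t ts ih =>
    intro s
    simp only [pvTotalB, List.foldl_cons] at *
    rw [ih]
    conv_rhs => rw [ih]
    split_ifs <;> ring

-- A's fold, combined to its answer, equals the total-plus-max-leftover formula
theorem pvA_loop (ts : List (List Int)) : ∀ (mi mc sp : Int),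
    (let s := ts.foldl
      (fun (st : Int × Int × Int) trans =>
        let c := PySem.List.pyGetD trans 0 0
        let b := PySem.List.pyGetD trans 1 0
        if c ≤ b then (max st.1 c, st.2.1, st.2.2)
        else (st.1, max st.2.1 b, st.2.2 + (c - b)))
      (mi, mc, sp)
     max s.2.1 s.1 + s.2.2)
    = ts.foldl (fun m t => max m (pvMin t)) (max mc mi) + sp + pvTotalB ts := by
  induction ts with
  | nil => intro mi mc sp; simp [pvTotalB]
  | cons t ts ih =>
    intro mi mc sp
    by_cases h : PySem.List.pyGetD t 0 0 ≤ PySem.List.pyGetD t 1 0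
    · simp only [List.foldl_cons, if_pos h]
      rw [ih]
      have hl : pvMin t = PySem.List.pyGetD t 0 0 := by simp [pvMin]; omega
      have hT : pvTotalB (t :: ts) = pvTotalB ts := by
        conv_lhs => rw [pvTotalB, List.foldl_cons]
        rw [pvTotalB_seed,
          if_neg (show ¬ (PySem.List.pyGetD t 0 0 > PySem.List.pyGetD t 1 0) by omega)]
        ring
      rw [hT, hl]
      have : max mc (max mi (PySem.List.pyGetD t 0 0))
           = max (max mc mi) (PySem.List.pyGetD t 0 0) := by omega
      rw [this]
    · simp only [List.foldl_cons, if_neg h]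
      rw [ih]
      have hl : pvMin t = PySem.List.pyGetD t 1 0 := by simp [pvMin]; omega
      have hT : pvTotalB (t :: ts)
          = (PySem.List.pyGetD t 0 0 - PySem.List.pyGetD t 1 0) + pvTotalB ts := by
        conv_lhs => rw [pvTotalB, List.foldl_cons]
        rw [pvTotalB_seed,
          if_pos (show PySem.List.pyGetD t 0 0 > PySem.List.pyGetD t 1 0 by omega)]
        ring
      rw [hT, hl]
      have : max (max mc (PySem.List.pyGetD t 1 0)) mi
           = max (max mc mi) (PySem.List.pyGetD t 1 0) := by omega
      rw [this]
      ring

theorem pvTotalB_nonneg (ts : List (List Int)) : 0 ≤ pvTotalB ts := by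
  induction ts with
  | nil => rw [pvTotalB]; simp
  | cons t ts ih =>
    rw [pvTotalB, List.foldl_cons, pvTotalB_seed]
    split_ifs with h <;> omega

theorem pvM_fold_ge_seed (ts : List (List Int)) : ∀ (m : Int),
    m ≤ ts.foldl (fun m t => max m (pvMin t)) m := by
  induction ts with
  | nil => intro m; simp
  | cons t ts ih =>
    intro m
    simp only [List.foldl_cons]
    exact le_trans (le_max_left m (pvMin t)) (ih _)

theorem pvM_fold_ge_mem (ts : List (List Int)) : ∀ (m : Int),
    ∀ t ∈ ts, pvMin t ≤ ts.foldl (fun m t => max m (pvMin t)) m := by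
  induction ts with
  | nil => intro m t ht; cases ht
  | cons t ts ih =>
    intro m t' ht'
    simp only [List.foldl_cons]
    rcases List.mem_cons.mp ht' with h | h
    · subst h
      exact le_trans (le_max_right m (pvMin t')) (pvM_fold_ge_seed ts _)
    · exact ih _ t' h

theorem pvM_fold_attained (ts : List (List Int)) : ∀ (m : Int),
    ts.foldl (fun m t => max m (pvMin t)) m = m ∨
    ∃ t ∈ ts, ts.foldl (fun m t => max m (pvMin t)) m = pvMin t := by
  induction ts with
  | nil => intro m; left; rfl
  | cons t ts ih =>
    intro m
    simp only [List.foldl_cons]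
    rcases ih (max m (pvMin t)) with h | ⟨t', ht', h⟩
    · rcases max_choice m (pvMin t) with hm | hm
      · left; rw [h, hm]
      · right; exact ⟨t, List.mem_cons_self .., by rw [h, hm]⟩
    · right; exact ⟨t', List.mem_cons_of_mem _ ht', h⟩

theorem pvAllOkB_iff (total x : Int) (ts : List (List Int)) :
    pvAllOkB total x ts = true ↔ ∀ t ∈ ts, total + pvMin t ≤ x := by
  induction ts with
  | nil => simp [pvAllOkB]
  | cons t ts ih =>
    simp only [pvAllOkB]
    split_ifs with h
    · simp only [false_iff]
      intro hall
      have := hall t (List.mem_cons_self ..)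
      simp only [pvMin] at this
      omega
    · rw [ih]
      constructor
      · intro hall t' ht'
        rcases List.mem_cons.mp ht' with h' | h'
        · subst h'; simp only [pvMin]; omega
        · exact hall t' h'
      · intro hall t' ht'
        exact hall t' (List.mem_cons_of_mem _ ht')

theorem pvFeasibleB_iff (total x : Int) (ts : List (List Int)) :
    pvFeasibleB total x ts = true ↔ (total ≤ x ∧ ∀ t ∈ ts, total + pvMin t ≤ x) := by
  unfold pvFeasibleB
  split_ifs with h
  · simp only [false_iff]
    intro ⟨h1, _⟩; omega
  · rw [pvAllOkB_iff]
    constructor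
    · intro hall; exact ⟨by omega, hall⟩
    · intro ⟨_, hall⟩; exact hall

-- feasibility is exactly 'x ≥ the optimum'
theorem pvFeasibleB_char (ts : List (List Int)) (x : Int) :
    pvFeasibleB (pvTotalB ts) x ts = true ↔ pvTotalB ts + pvM ts ≤ x := by
  rw [pvFeasibleB_iff]
  constructor
  · intro ⟨h1, h2⟩
    rcases pvM_fold_attained ts 0 with h | ⟨t, ht, h⟩
    · unfold pvM; omega
    · have := h2 t ht
      unfold pvM; omega
  · intro h
    have h0 : 0 ≤ pvM ts := pvM_fold_ge_seed ts 0
    refine ⟨by omega, fun t ht => ?_⟩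
    have := pvM_fold_ge_mem ts 0 t ht
    unfold pvM at h; omega

-- the max-leftover fold is bounded by the positive-part-sum fold
theorem pvM_le_sum (ts : List (List Int)) : ∀ (m s : Int), 0 ≤ m → m ≤ s →
    ts.foldl (fun m t => max m (pvMin t)) m
    ≤ ts.foldl
        (fun h t =>
          let mv := min (PySem.List.pyGetD t 0 0) (PySem.List.pyGetD t 1 0)
          if mv > 0 then h + mv else h) s := by
  induction ts with
  | nil => intro m s _ h2; simpa using h2
  | cons t ts ih =>
    intro m s h0 hms
    simp only [List.foldl_cons]
    apply ih
    · exact le_trans h0 (le_max_left m (pvMin t))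
    · simp only [pvMin]
      split_ifs with h <;> omega

-- seed shift for pvHiB's fold
theorem pvHiB_seed (ts : List (List Int)) : ∀ (s : Int),
    ts.foldl
      (fun h t =>
        let mv := min (PySem.List.pyGetD t 0 0) (PySem.List.pyGetD t 1 0)
        if mv > 0 then h + mv else h) s
    = s + ts.foldl
        (fun h t =>
          let mv := min (PySem.List.pyGetD t 0 0) (PySem.List.pyGetD t 1 0)
          if mv > 0 then h + mv else h) 0 := by
  induction ts with
  | nil => intro s; simp
  | cons t ts ih =>
    intro s
    simp only [List.foldl_cons]
    rw [ih]
    conv_rhs => rw [ih]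
    split_ifs <;> ring

-- the upper seed is feasible
theorem pvHiB_ge (ts : List (List Int)) :
    pvTotalB ts + pvM ts ≤ pvHiB (pvTotalB ts) ts := by
  unfold pvHiB pvM
  rw [pvHiB_seed]
  have := pvM_le_sum ts 0 0 le_rfl le_rfl
  omega

-- binary search finds the threshold of a characterised predicate
theorem pvBSearchB_eq (ts : List (List Int)) (total L : Int)
    (hchar : ∀ x, pvFeasibleB total x ts = true ↔ L ≤ x) :
    ∀ (n : Nat) (lo hi : Int), (hi - lo).toNat ≤ n → lo ≤ L → L ≤ hi →
      pvBSearchB ts total lo hi = L := by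
  intro n
  induction n with
  | zero =>
    intro lo hi hn h1 h2
    rw [pvBSearchB, dif_neg (by omega)]
    omega
  | succ n ih =>
    intro lo hi hn h1 h2
    by_cases h : lo < hi
    · rw [pvBSearchB, dif_pos h]
      have he : PySem.Int.floordiv (lo + hi) 2 = (lo + hi) / 2 :=
        PySem.Int.floordiv_eq_ediv_of_pos (by omega)
      simp only [he]
      by_cases hf : pvFeasibleB total ((lo + hi) / 2) ts = true
      · rw [if_pos hf]
        have hL := (hchar _).mp hf
        exact ih lo _ (by omega) h1 hL
      · rw [if_neg hf]
        have hL : ¬ L ≤ (lo + hi) / 2 := fun hle => hf ((hchar _).mpr hle)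
        exact ih _ hi (by omega) (by omega) h2
    · rw [pvBSearchB, dif_neg h]
      omega

-- ===== VERDICT (by name: the statement is the Claim_ definition above) =====
theorem minimumMoney_spec : Claim_equal_minimumMoney := by
  intro ts _ _
  unfold Spec_minimumMoney minimumMoney minimumMoney_alt
  have hA := pvA_loop ts 0 0 0
  simp only [max_self] at hA
  rw [hA]
  have hchar := pvFeasibleB_char ts
  have hB := pvBSearchB_eq ts (pvTotalB ts) (pvTotalB ts + pvM ts) hchar
      (pvHiB (pvTotalB ts) ts - 0).toNat 0 (pvHiB (pvTotalB ts) ts)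
      (by omega)
      (by have h1 := pvTotalB_nonneg ts
          have h2 := pvM_fold_ge_seed ts 0
          unfold pvM; omega)
      (pvHiB_ge ts)
  show List.foldl (fun m t => max m (pvMin t)) 0 ts + 0 + pvTotalB ts
      = pvBSearchB ts (pvTotalB ts) 0 (pvHiB (pvTotalB ts) ts)
  rw [hB]
  unfold pvM
  ring
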